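-- pv_equiv track=rewrite | github.com/Selasi-K/GEOG5990---ASSIGNMENT-2 | src/my_modules/geometry.py | add_rasters
-- ===== SOURCE A (Python) =====
-- def add_rasters(data):
--     """
--     Adds the input rasters together.
--
--     Args:
--         data (list): A list containing the nested geology, population, and transport lists.
--
--     Returns:
--         list: A nested list representing the added rasters.
--     """
--     # Get the shape of the nested lists
--     num_rows, num_cols = len(data[0]), len(data[0][0])
--
--     # Create a new nested list to store the added rasters
--     added_rasters = []
--
--     # Iterate over each row and column
--     for row_idx in range(num_rows):
--         added_row = []
--         for col_idx in range(num_cols):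
--             # Sum the pixel values across all three nested lists
--             pixel_sum = sum(nested_list[row_idx][col_idx] for nested_list in data)
--             added_row.append(pixel_sum)
--         added_rasters.append(added_row)
--
--     return added_rasters
-- ===== SOURCE B (Python) =====
-- def add_rasters(data):
--     num_rows, num_cols = len(data[0]), len(data[0][0])
--     # Flatten each raster into a 1-D row-major vector (shape fixed by data[0]).
--     flats = [[raster[r][c] for r in range(num_rows) for c in range(num_cols)]
--              for raster in data]
--     # Transpose the flat vectors with zip and sum each pixel column.
--     total = [sum(px) for px in zip(*flats)]
--     # Reshape the flat totals back into rows.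
--     return [total[r * num_cols:(r + 1) * num_cols] for r in range(num_rows)]
-- ===== Notes on version B (the rewrite author's own statement) =====
-- stated objective: alternative
-- what changed: B changes the data representation: it flattens each raster into a 1-D row-major vector, transposes the vectors with zip(*) and sums each pixel column, then reshapes the flat totals back into rows by slicing, instead of A's nested rows*cols loops with an inner per-pixel generator sum.
import Mathlib
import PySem

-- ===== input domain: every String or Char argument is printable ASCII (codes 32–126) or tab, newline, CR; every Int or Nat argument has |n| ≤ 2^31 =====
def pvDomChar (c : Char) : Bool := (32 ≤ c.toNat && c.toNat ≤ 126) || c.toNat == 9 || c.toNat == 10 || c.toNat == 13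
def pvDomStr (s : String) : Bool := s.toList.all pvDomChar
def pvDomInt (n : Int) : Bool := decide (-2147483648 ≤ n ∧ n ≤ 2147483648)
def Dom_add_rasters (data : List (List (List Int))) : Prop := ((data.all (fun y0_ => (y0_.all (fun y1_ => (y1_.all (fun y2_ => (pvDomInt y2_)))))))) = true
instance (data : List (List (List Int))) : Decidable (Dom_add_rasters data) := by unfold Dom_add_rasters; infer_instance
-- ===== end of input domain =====

-- B flattens each raster to a 1-D vector, transposes with zip and sums per pixel, then
-- reshapes by slicing (alternative data representation, same cost).

-- ===== PORT A =====
-- A's nested loops with a per-pixel generator sum; indexing via getD, defaults never fire inside Pre_.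
def add_rasters (data : List (List (List Int))) : List (List Int) :=
  let first := data.headD []
  let num_rows := first.length
  let num_cols := (first.headD []).length
  (List.range num_rows).map (fun row_idx =>
    (List.range num_cols).map (fun col_idx =>
      (data.map (fun nested_list => (nested_list.getD row_idx []).getD col_idx 0)).sum))

-- ===== PORT B =====
-- port of Python's zip(*flats) followed by per-tuple sum: emit the sum of the heads while
-- every list is nonempty (zip stops at the shortest iterator), then recurse on the tails
def pvZipSum (ls : List (List Int)) : List Int :=
  if h : ls ≠ [] ∧ ls.all (fun l => !l.isEmpty) then
    (ls.map (fun l => l.headD 0)).sum :: pvZipSum (ls.map List.tail)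
  else []
termination_by (ls.headD []).length
decreasing_by
  cases ls with
  | nil => exact absurd rfl h.1
  | cons x xs =>
      have hx : x.isEmpty = false := by
        have := (List.all_eq_true.mp h.2) x (by simp)
        simpa using this
      have hlt : 0 < x.length := by
        cases x with
        | nil => simp at hx
        | cons a t => simp
      simp [List.attach_cons]
      omega

def add_rasters_alt (data : List (List (List Int))) : List (List Int) :=
  let first := data.headD []
  let num_rows := first.length
  let num_cols := (first.headD []).length
  let flats := data.map (fun raster =>
    (List.range num_rows).flatMap (fun r =>
      (List.range num_cols).map (fun c => (raster.getD r []).getD c 0)))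
  let total := pvZipSum flats
  -- total[r*num_cols:(r+1)*num_cols] with natural bounds = drop/take (PySem.List.slice_natCast_add)
  (List.range num_rows).map (fun r => (total.drop (r * num_cols)).take num_cols)

-- ===== PRECONDITION & SPEC =====
-- Exactly the inputs on which the Python A returns (no IndexError): data and data[0] are
-- nonempty, and — unless num_cols = 0, when the inner loop never indexes — every raster
-- has at least num_rows rows whose first num_rows rows each have at least num_cols entries.
def Pre_add_rasters (data : List (List (List Int))) : Prop :=
  data ≠ [] ∧ data.headD [] ≠ [] ∧
  (((data.headD []).headD []).length ≠ 0 →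
    ∀ raster ∈ data, (data.headD []).length ≤ raster.length ∧
      ∀ row ∈ raster.take (data.headD []).length,
        ((data.headD []).headD []).length ≤ row.length)
instance (data : List (List (List Int))) : Decidable (Pre_add_rasters data) := by
  unfold Pre_add_rasters; infer_instance
def pvWitness_add_rasters : List (List (List Int)) :=
  [[[1, 2], [3, 4]], [[5, 6], [7, 8]], [[-1, 0], [0, 1]]]
def Spec_add_rasters (data : List (List (List Int))) (out : List (List Int)) : Prop := out = add_rasters_alt data
instance (data : List (List (List Int))) (out : List (List Int)) : Decidable (Spec_add_rasters data out) := by unfold Spec_add_rasters; infer_instance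

-- ===== CLAIM (what is proved, stated in full; the proofs are below) =====
def Claim_equal_add_rasters : Prop := ∀ (data : List (List (List Int))), Dom_add_rasters data → Pre_add_rasters data → Spec_add_rasters data (add_rasters data)

-- ===== LEMMAS AND PROOFS =====

theorem pv_tail_getD (l : List Int) (h : l ≠ []) (i : Nat) :
    l.tail.getD i 0 = l.getD (i + 1) 0 := by
  cases l with
  | nil => exact absurd rfl h
  | cons a t => simp

theorem pv_zipSum_eq (n : Nat) :
    ∀ ls : List (List Int), ls ≠ [] → (∀ l ∈ ls, l.length = n) →
      pvZipSum ls = (List.range n).map (fun i => (ls.map (fun l => l.getD i 0)).sum) := by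
  induction n with
  | zero =>
      intro ls hne hlen
      rw [pvZipSum]
      rw [dif_neg]
      · simp
      · intro ⟨_, hall⟩
        cases ls with
        | nil => exact hne rfl
        | cons x xs =>
            have hx := hlen x (by simp)
            have := (List.all_eq_true.mp hall) x (by simp)
            have hx0 : x = [] := List.eq_nil_of_length_eq_zero hx
            simp [hx0] at this
  | succ n ih =>
      intro ls hne hlen
      have hall : ls.all (fun l => !l.isEmpty) = true := by
        rw [List.all_eq_true]
        intro l hl
        have := hlen l hl
        cases l with
        | nil => simp at this
        | cons a t => simp
      rw [pvZipSum, dif_pos ⟨hne, hall⟩]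
      have htne : ls.map List.tail ≠ [] := by
        cases ls <;> simp_all
      have htlen : ∀ l ∈ ls.map List.tail, l.length = n := by
        intro l hl
        obtain ⟨l', hl', rfl⟩ := List.mem_map.mp hl
        have := hlen l' hl'
        simp [List.length_tail, this]
      rw [ih (ls.map List.tail) htne htlen]
      rw [List.range_succ_eq_map]
      simp only [List.map_cons, List.map_map]
      congr 1
      · congr 1
        apply List.map_congr_left
        intro l hl
        have := hlen l hl
        cases l with
        | nil => simp at this
        | cons a t => simp
      · apply List.map_congr_left
        intro i _
        simp only [Function.comp, Nat.succ_eq_add_one]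
        congr 1
        apply List.map_congr_left
        intro l hl
        have hlne : l ≠ [] := by
          have := hlen l hl; cases l with
          | nil => simp at this
          | cons a t => simp
        exact pv_tail_getD l hlne i

theorem pv_flat_len (nc : Nat) (g : Nat → Nat → Int) :
    ∀ m : Nat, ((List.range m).flatMap (fun r => (List.range nc).map (g r))).length = m * nc := by
  intro m
  induction m with
  | zero => simp
  | succ k ih =>
      rw [List.range_succ, List.flatMap_append]
      simp [ih, Nat.succ_mul]

theorem pv_flat_getD (nc : Nat) (g : Nat → Nat → Int) (r c : Nat) (hc : c < nc) :
    ∀ m : Nat, r < m →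
      ((List.range m).flatMap (fun r => (List.range nc).map (g r))).getD (r * nc + c) 0 = g r c := by
  intro m
  induction m with
  | zero => omega
  | succ k ih =>
      intro hr
      rw [List.range_succ, List.flatMap_append]
      by_cases hrk : r < k
      · have hlt : r * nc + c < ((List.range k).flatMap (fun r => (List.range nc).map (g r))).length := by
          rw [pv_flat_len]
          calc r * nc + c < r * nc + nc := by omega
            _ = (r + 1) * nc := by ring
            _ ≤ k * nc := Nat.mul_le_mul_right nc hrk
        rw [List.getD_eq_getElem?_getD, List.getElem?_append_left hlt,
            ← List.getD_eq_getElem?_getD]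
        exact ih hrk
      · have hrk' : r = k := by omega
        subst hrk'
        rw [List.getD_eq_getElem?_getD, List.getElem?_append_right (by rw [pv_flat_len]; omega)]
        rw [pv_flat_len]
        have : r * nc + c - r * nc = c := by omega
        rw [this]
        simp only [List.flatMap_cons, List.flatMap_nil, List.append_nil]
        rw [List.getElem?_map, List.getElem?_range hc]
        simp

theorem pv_reshape (N a b : Nat) (G : Nat → Int) (hab : a + b ≤ N) :
    (((List.range N).map G).drop a).take b = (List.range b).map (fun j => G (a + j)) := by
  apply List.ext_getElem
  · simp; omega
  · intro i h1 h2
    simp only [List.getElem_take, List.getElem_drop, List.getElem_map, List.getElem_range]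

-- ===== VERDICT (by name: the statement is the Claim_ definition above) =====
theorem add_rasters_spec : Claim_equal_add_rasters := by
  intro data _ hpre
  unfold Spec_add_rasters add_rasters add_rasters_alt
  obtain ⟨hne, -, -⟩ := hpre
  simp only []
  set first := data.headD [] with hfirst
  set nr := first.length
  set nc := (first.headD []).length
  have hflatsne : data.map (fun raster =>
      (List.range nr).flatMap (fun r =>
        (List.range nc).map (fun c => (raster.getD r []).getD c 0))) ≠ [] := by
    cases data with
    | nil => exact absurd rfl hne
    | cons x xs => simp
  have hflen : ∀ l ∈ data.map (fun raster =>
      (List.range nr).flatMap (fun r =>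
        (List.range nc).map (fun c => (raster.getD r []).getD c 0))), l.length = nr * nc := by
    intro l hl
    obtain ⟨raster, _, rfl⟩ := List.mem_map.mp hl
    exact pv_flat_len nc (fun r c => (raster.getD r []).getD c 0) nr
  rw [pv_zipSum_eq (nr * nc) _ hflatsne hflen]
  apply List.ext_getElem
  · simp
  · intro r h1 h2
    simp only [List.getElem_map, List.getElem_range]
    have hr : r < nr := by simpa using h1
    rw [pv_reshape (nr * nc) (r * nc) nc _
        (by calc r * nc + nc = (r + 1) * nc := by ring
              _ ≤ nr * nc := Nat.mul_le_mul_right nc hr)]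
    apply List.map_congr_left
    intro c hc
    have hc' : c < nc := List.mem_range.mp hc
    simp only [List.map_map]
    congr 1
    apply List.map_congr_left
    intro raster _
    simp only [Function.comp]
    exact (pv_flat_getD nc (fun r c => (raster.getD r []).getD c 0) r c hc' nr hr).symm
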